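-- pv_equiv track=rewrite | github.com/knschuckmann/Timeseries | timeseries/modules/test.py | remove_unimportant_columns
-- ===== SOURCE A (Python) =====
-- def remove_unimportant_columns(all_columns, column_list):
--
--     result_columns = set(all_columns)
--     for column in column_list:
--         try:
--             result_columns -= set([column])
--         except:
--             continue
--     return result_columns
-- ===== SOURCE B (Python) =====
-- def remove_unimportant_columns(all_columns, column_list):
--     exclude = dict.fromkeys(column_list)
--     result = set()
--     for column in all_columns:
--         if column not in exclude:
--             result.add(column)
--     return result
-- ===== Notes on version B (the rewrite author's own statement) =====
-- stated objective: alternative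
-- what changed: A builds set(all_columns) and then subtracts a fresh singleton set per element of column_list; B instead indexes column_list once as a dict and makes a single pass over all_columns with an accumulator set, adding each column only if it is not a key of that dict, never constructing set(all_columns) or any singleton sets.
import Mathlib
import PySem

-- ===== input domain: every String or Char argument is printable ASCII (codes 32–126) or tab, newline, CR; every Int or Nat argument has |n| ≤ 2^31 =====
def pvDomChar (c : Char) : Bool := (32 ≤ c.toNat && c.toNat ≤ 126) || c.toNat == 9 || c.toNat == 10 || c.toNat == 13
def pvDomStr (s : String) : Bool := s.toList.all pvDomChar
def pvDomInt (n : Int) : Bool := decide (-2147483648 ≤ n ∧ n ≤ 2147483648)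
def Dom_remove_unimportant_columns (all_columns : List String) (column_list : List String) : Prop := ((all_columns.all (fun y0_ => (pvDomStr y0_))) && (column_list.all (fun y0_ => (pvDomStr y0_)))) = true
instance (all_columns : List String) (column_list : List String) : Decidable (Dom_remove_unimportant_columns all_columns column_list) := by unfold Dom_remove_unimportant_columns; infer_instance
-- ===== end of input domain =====

-- B replaces A's "build set(all_columns), then subtract one singleton set per element of
-- column_list" with a dict index of column_list (dict.fromkeys) plus a single pass over
-- all_columns that conditionally adds each column to an accumulator set; objective: alternative.
-- Both return Python sets (order undefined); here the two ports produce the same element list.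

-- ===== PORT A =====
def remove_unimportant_columns (all_columns : List String) (column_list : List String) : List String :=
  -- result_columns = set(all_columns); for column in column_list: result_columns -= set([column])
  -- (strings are hashable, so the try/except never fires on the String domain)
  let result_columns := PySem.Set.ofList all_columns
  column_list.foldl (fun result_columns column =>
    PySem.Set.diff result_columns (PySem.Set.ofList [column])) result_columns

-- ===== PORT B =====
def remove_unimportant_columns_alt (all_columns : List String) (column_list : List String) : List String :=
  -- exclude = dict.fromkeys(column_list)
  let exclude : PySem.Dict String (Option Unit) :=
    column_list.foldl (fun d column => d.insert column none) PySem.Dict.empty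
  -- result = set(); for column in all_columns: if column not in exclude: result.add(column)
  all_columns.foldl (fun result column =>
    if !(exclude.contains column) then PySem.Set.add result column else result)
    PySem.Set.empty

-- ===== PRECONDITION & SPEC =====
def Spec_remove_unimportant_columns (all_columns : List String) (column_list : List String) (out : List String) : Prop := out = remove_unimportant_columns_alt all_columns column_list
instance (all_columns : List String) (column_list : List String) (out : List String) : Decidable (Spec_remove_unimportant_columns all_columns column_list out) := by unfold Spec_remove_unimportant_columns; infer_instance

-- ===== CLAIM =====
def Claim_equal_remove_unimportant_columns : Prop := ∀ (all_columns : List String) (column_list : List String), Dom_remove_unimportant_columns all_columns column_list → Spec_remove_unimportant_columns all_columns column_list (remove_unimportant_columns all_columns column_list)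

-- ===== LEMMAS AND PROOFS =====

-- A's loop: folding singleton-set subtraction over cl filters s by non-membership in cl
theorem foldl_diff_singleton (cl : List String) (s : List String) :
    cl.foldl (fun r c => PySem.Set.diff r (PySem.Set.ofList [c])) s
      = s.filter (fun x => !(cl.contains x)) := by
  induction cl generalizing s with
  | nil => simp
  | cons c cl ih =>
    rw [List.foldl_cons, ih, PySem.Set.diff, List.filter_filter]
    apply List.filter_congr
    intro x _
    simp [PySem.Set.contains, PySem.Set.ofList, PySem.Set.add, PySem.Set.empty,
      Bool.and_comm]

-- B's loop: conditional add equals plain add over the pre-filtered list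
theorem foldl_condadd (p : String → Bool) (xs : List String) (s : List String) :
    xs.foldl (fun r c => if p c then PySem.Set.add r c else r) s
      = (xs.filter p).foldl PySem.Set.add s := by
  induction xs generalizing s with
  | nil => rfl
  | cons x xs ih =>
    by_cases h : p x = true <;> simp [h, ih]

-- filter commutes with set-building (dedup by first occurrence)
theorem filter_foldl_add (p : String → Bool) (xs : List String) (s : List String) :
    (xs.foldl PySem.Set.add s).filter p = (xs.filter p).foldl PySem.Set.add (s.filter p) := by
  induction xs generalizing s with
  | nil => rfl
  | cons x xs ih =>
    by_cases h : p x = true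
    · rw [List.filter_cons_of_pos h, List.foldl_cons, List.foldl_cons, ih]
      congr 1
      unfold PySem.Set.add
      have hc : PySem.Set.contains (s.filter p) x = PySem.Set.contains s x := by
        simp [PySem.Set.contains, List.contains_iff_mem, List.mem_filter, h]
      rw [hc]
      by_cases hm : PySem.Set.contains s x = true <;>
        simp only [PySem.Set.contains, List.contains_iff_mem] at hm
      · simp [hm]
      · simp [hm, List.filter_append, h]
    · rw [List.filter_cons_of_neg h, List.foldl_cons, ih]
      congr 1
      unfold PySem.Set.add
      split_ifs with hm
      · rfl
      · simp [List.filter_append, h]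

-- ===== VERDICT =====
theorem remove_unimportant_columns_spec : Claim_equal_remove_unimportant_columns := by
  intro all_columns column_list _
  unfold Spec_remove_unimportant_columns remove_unimportant_columns remove_unimportant_columns_alt
  have hcont : ∀ c : String,
      (column_list.foldl (fun d column => d.insert column none)
        (PySem.Dict.empty : PySem.Dict String (Option Unit))).contains c
        = column_list.contains c := by
    intro c
    rw [PySem.Dict.contains_eq_decide_mem_keys,
      PySem.Dict.keys_foldl_insert column_list (fun _ _ => none) PySem.Dict.empty]
    have : List.foldl PySem.Set.add [] column_list = PySem.Set.ofList column_list := by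
      rw [PySem.Set.ofList_eq_foldl]
    simp [PySem.Set.update, PySem.Dict.empty, this, PySem.Set.mem_ofList,
      List.contains_iff_mem]
  have hfun : (fun (result : List String) (column : String) =>
      if !((column_list.foldl (fun d column => d.insert column none)
          (PySem.Dict.empty : PySem.Dict String (Option Unit))).contains column)
        then PySem.Set.add result column else result)
      = (fun result column =>
        if !(column_list.contains column) then PySem.Set.add result column else result) := by
    funext r c
    rw [hcont c]
  simp only [hfun]
  rw [foldl_diff_singleton, foldl_condadd]
  have hof : PySem.Set.ofList all_columns = all_columns.foldl PySem.Set.add PySem.Set.empty := rfl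
  rw [hof, filter_foldl_add]
  rfl
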